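-- pv_equiv track=rewrite | github.com/Shaunak-Rahatekar/LDAM-FINAL-1 | camera_processor.py | _filter_path_obstacles
-- ===== SOURCE A (Python) =====
-- from typing import List, Tuple, Optional, Dict, Any
--
-- def _filter_path_obstacles(obstacles: List[Tuple[int, int]],
--                            current_path: List[Tuple[int, int]]) -> List[Tuple[int, int]]:
--     """
--     Filter obstacles to only include those in or near the navigation path
--     This focuses detection on obstacles that actually matter for navigation
--     """
--     if not obstacles or not current_path:
--         return obstacles
--
--     path_set = set(current_path)
--     path_obstacles = []
--
--     # Check obstacles within path or nearby (within 2 cells)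
--     for obstacle in obstacles:
--         # Check if obstacle is directly in path
--         if obstacle in path_set:
--             path_obstacles.append(obstacle)
--         else:
--             # Check if obstacle is near path (within 2 cells)
--             for path_pos in current_path[:10]:  # Check next 10 path positions
--                 distance = abs(obstacle[0] - path_pos[0]) + abs(obstacle[1] - path_pos[1])
--                 if distance <= 2:
--                     path_obstacles.append(obstacle)
--                     break
--
--     return path_obstacles
-- ===== SOURCE B (Python) =====
-- from typing import List, Tuple
--
-- def _filter_path_obstacles(obstacles: List[Tuple[int, int]],
--                            current_path: List[Tuple[int, int]]) -> List[Tuple[int, int]]: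
--     if not obstacles or not current_path:
--         return obstacles
--     offsets = [(dx, dy) for dx in range(-2, 3) for dy in range(-2, 3)
--                if abs(dx) + abs(dy) <= 2]
--     relevant = set(current_path)
--     relevant.update((p[0] + dx, p[1] + dy)
--                     for p in current_path[:10] for (dx, dy) in offsets)
--     return [o for o in obstacles if o in relevant]
-- ===== Notes on version B (the rewrite author's own statement) =====
-- stated objective: alternative
-- what changed: B precomputes one 'relevant' set (the path plus the Manhattan-distance-<=2 neighborhood of the first 10 path cells) and filters obstacles with a single membership test, instead of A's per-obstacle inner scan over the path prefix.
import Mathlib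
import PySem

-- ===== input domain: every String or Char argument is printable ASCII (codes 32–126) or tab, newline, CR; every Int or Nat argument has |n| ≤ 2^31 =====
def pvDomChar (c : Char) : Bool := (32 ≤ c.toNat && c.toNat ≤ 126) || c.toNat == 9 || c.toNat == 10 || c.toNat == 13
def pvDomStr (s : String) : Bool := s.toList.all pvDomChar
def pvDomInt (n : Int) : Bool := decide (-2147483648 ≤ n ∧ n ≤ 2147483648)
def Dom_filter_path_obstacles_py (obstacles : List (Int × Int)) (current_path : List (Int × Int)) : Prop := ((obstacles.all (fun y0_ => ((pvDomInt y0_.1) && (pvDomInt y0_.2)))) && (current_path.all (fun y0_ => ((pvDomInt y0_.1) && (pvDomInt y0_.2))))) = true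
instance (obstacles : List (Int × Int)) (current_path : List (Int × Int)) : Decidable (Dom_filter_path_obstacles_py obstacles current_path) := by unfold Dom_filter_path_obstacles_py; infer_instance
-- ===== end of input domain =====

-- B replaces the per-obstacle inner scan over the path by a precomputed neighborhood set
-- (path ∪ distance-≤2 offsets of the first 10 path cells) and a single membership pass (alternative algorithm).


-- ===== PORT A =====
-- the inner 'for path_pos in current_path[:10]: … break' appends once on the first hit = List.any over take 10
def filter_path_obstacles_py (obstacles : List (Int × Int)) (current_path : List (Int × Int)) : List (Int × Int) :=
  if obstacles = [] ∨ current_path = [] then obstacles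
  else
    let path_set := PySem.Set.ofList current_path
    obstacles.foldl (fun path_obstacles obstacle =>
      if PySem.Set.contains path_set obstacle then path_obstacles ++ [obstacle]
      else if (current_path.take 10).any
          (fun path_pos => decide ((obstacle.1 - path_pos.1).natAbs + (obstacle.2 - path_pos.2).natAbs ≤ 2)) then
        path_obstacles ++ [obstacle]
      else path_obstacles) []

-- ===== PORT B =====
-- offsets = [(dx,dy) for dx in range(-2,3) for dy in range(-2,3) if abs(dx)+abs(dy) <= 2]
def pvOffsets : List (Int × Int) :=
  (PySem.List.pyRange (-2) 3 1).flatMap (fun dx =>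
    (PySem.List.pyRange (-2) 3 1).filterMap (fun dy =>
      if dx.natAbs + dy.natAbs ≤ 2 then some (dx, dy) else none))

def filter_path_obstacles_py_alt (obstacles : List (Int × Int)) (current_path : List (Int × Int)) : List (Int × Int) :=
  if obstacles = [] ∨ current_path = [] then obstacles
  else
    let relevant := PySem.Set.update (PySem.Set.ofList current_path)
      ((current_path.take 10).flatMap (fun p => pvOffsets.map (fun o => (p.1 + o.1, p.2 + o.2))))
    obstacles.filter (fun o => PySem.Set.contains relevant o)

-- ===== PRECONDITION & SPEC =====
def Spec_filter_path_obstacles_py (obstacles : List (Int × Int)) (current_path : List (Int × Int)) (out : List (Int × Int)) : Prop := out = filter_path_obstacles_py_alt obstacles current_path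
instance (obstacles : List (Int × Int)) (current_path : List (Int × Int)) (out : List (Int × Int)) : Decidable (Spec_filter_path_obstacles_py obstacles current_path out) := by unfold Spec_filter_path_obstacles_py; infer_instance

-- ===== CLAIM (what is proved, stated in full; the proofs are below) =====
def Claim_equal_filter_path_obstacles_py : Prop := ∀ (obstacles : List (Int × Int)) (current_path : List (Int × Int)), Dom_filter_path_obstacles_py obstacles current_path → Spec_filter_path_obstacles_py obstacles current_path (filter_path_obstacles_py obstacles current_path)

-- ===== LEMMAS AND PROOFS =====

lemma mem_pvOffsets (x : Int × Int) : x ∈ pvOffsets ↔ x.1.natAbs + x.2.natAbs ≤ 2 := by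
  obtain ⟨a, b⟩ := x
  simp only [pvOffsets, List.mem_flatMap, List.mem_filterMap,
    PySem.List.mem_pyRange_one, Option.ite_none_right_eq_some, Option.some.injEq]
  constructor
  · rintro ⟨dx, hdx, dy, hdy, hle, h⟩
    cases h; simpa using hle
  · intro h
    exact ⟨a, by omega, b, by omega, by simpa using h, rfl⟩

lemma contains_relevant (cp : List (Int × Int)) (ob : Int × Int) :
    PySem.Set.contains
      (PySem.Set.update (PySem.Set.ofList cp)
        ((cp.take 10).flatMap (fun p => pvOffsets.map (fun o => (p.1 + o.1, p.2 + o.2))))) ob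
    = (PySem.Set.contains (PySem.Set.ofList cp) ob ||
       (cp.take 10).any (fun p => decide ((ob.1 - p.1).natAbs + (ob.2 - p.2).natAbs ≤ 2))) := by
  rw [Bool.eq_iff_iff]
  simp only [PySem.Set.contains_iff, PySem.Set.mem_update, Bool.or_eq_true, List.any_eq_true,
    decide_eq_true_eq, List.mem_flatMap, List.mem_map, PySem.Set.mem_ofList]
  refine or_congr_right ?_
  constructor
  · rintro ⟨p, hp, o, ho, rfl⟩
    rw [mem_pvOffsets] at ho
    exact ⟨p, hp, by simpa using ho⟩
  · rintro ⟨p, hp, hle⟩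
    refine ⟨p, hp, (ob.1 - p.1, ob.2 - p.2), (mem_pvOffsets _).2 (by simpa using hle), ?_⟩
    obtain ⟨a, b⟩ := ob; simp

-- ===== VERDICT (by name: the statement is the Claim_ definition above) =====
theorem filter_path_obstacles_py_spec : Claim_equal_filter_path_obstacles_py := by
  intro obstacles current_path _
  unfold Spec_filter_path_obstacles_py filter_path_obstacles_py filter_path_obstacles_py_alt
  split
  · rfl
  · have hfun : ∀ (acc : List (Int × Int)) (ob : Int × Int),
        (if PySem.Set.contains (PySem.Set.ofList current_path) ob then acc ++ [ob]
         else if (current_path.take 10).any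
            (fun p => decide ((ob.1 - p.1).natAbs + (ob.2 - p.2).natAbs ≤ 2)) then acc ++ [ob]
         else acc)
        = (if (PySem.Set.contains (PySem.Set.ofList current_path) ob ||
               (current_path.take 10).any
                 (fun p => decide ((ob.1 - p.1).natAbs + (ob.2 - p.2).natAbs ≤ 2))) then acc ++ [ob]
           else acc) := by
      intro acc ob
      rcases Bool.eq_false_or_eq_true (PySem.Set.contains (PySem.Set.ofList current_path) ob) with h | h <;>
        rcases Bool.eq_false_or_eq_true ((current_path.take 10).any
          (fun p => decide ((ob.1 - p.1).natAbs + (ob.2 - p.2).natAbs ≤ 2))) with h2 | h2 <;>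
        rw [h, h2] <;> simp
    calc obstacles.foldl (fun acc ob =>
          if PySem.Set.contains (PySem.Set.ofList current_path) ob then acc ++ [ob]
          else if (current_path.take 10).any
              (fun p => decide ((ob.1 - p.1).natAbs + (ob.2 - p.2).natAbs ≤ 2)) then acc ++ [ob]
          else acc) []
        = obstacles.foldl (fun acc ob =>
            if (PySem.Set.contains (PySem.Set.ofList current_path) ob ||
                (current_path.take 10).any
                  (fun p => decide ((ob.1 - p.1).natAbs + (ob.2 - p.2).natAbs ≤ 2))) then acc ++ [ob]
            else acc) [] := by
          congr 1; funext acc ob; exact hfun acc ob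
      _ = [] ++ obstacles.filter (fun ob =>
            (PySem.Set.contains (PySem.Set.ofList current_path) ob ||
             (current_path.take 10).any
               (fun p => decide ((ob.1 - p.1).natAbs + (ob.2 - p.2).natAbs ≤ 2)))) :=
          PySem.List.foldl_append_if_eq_filter _ _ _
      _ = obstacles.filter (fun o => PySem.Set.contains
            (PySem.Set.update (PySem.Set.ofList current_path)
              ((current_path.take 10).flatMap
                (fun p => pvOffsets.map (fun o => (p.1 + o.1, p.2 + o.2))))) o) := by
          rw [List.nil_append]
          exact List.filter_congr (fun ob _ => (contains_relevant current_path ob).symm)
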